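-- pv_equiv track=rewrite | github.com/tyt063144/TTLinks | ipservice/ip_utils.py | netmask_expand
-- ===== SOURCE A (Python) =====
-- from itertools import product
-- from typing import List, Dict, Any
--
-- def netmask_expand(ip_digits: List[int], netmask_digits: List[int]) -> List[tuple[int]]:
--     """
--     Expands the given IP digits based on the netmask digits to generate all possible
--     combinations of IP addresses.
--
--     This method takes a list of IP digits and a corresponding list of netmask digits.
--     The netmask determines which bits of the IP address are fixed and which bits can vary.
--     If a bit in the netmask is 1, the corresponding IP bit is fixed. If the netmask bit is 0,
--     the corresponding IP bit can take multiple values (in this example, either 1 or 2).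
--
--     Args:
--         ip_digits (List[int]): A list of binary digits representing an IP address.
--         netmask_digits (List[int]): A list of binary digits representing the netmask.
--                                      A 1 indicates the bit is fixed, and a 0 indicates
--                                      the bit can vary.
--
--     Returns:
--         List[Tuple[int]]: A list of tuples, where each tuple represents a possible
--                           combination of IP digits generated based on the netmask.
--
--     Example:
--         ip_digits = [0, 1, 0]
--         netmask_digits = [1, 1, 0]
--         result = SubnetCombinator.netmask_expand(ip_digits, netmask_digits)
--         # result will be [(0, 1, 1), (0, 1, 2)]
--     """
--     expanded_ip_digits = {}
--     index = 0
--     for netmask_bit in netmask_digits: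
--         if netmask_bit == 1:
--             expanded_ip_digits[index] = [ip_digits[index]]
--         elif netmask_bit == 0:
--             expanded_ip_digits[index] = [0, 1]
--         index += 1
--     # Generate all combinations using itertools.product
--     combinations = list(product(*expanded_ip_digits.values()))
--     return combinations
-- ===== SOURCE B (Python) =====
-- def netmask_expand(ip_digits, netmask_digits):
--     # Template: fixed value per position, None where the bit varies; non-0/1 mask bits contribute nothing.
--     slots = []
--     for i, nb in enumerate(netmask_digits):
--         if nb == 1:
--             slots.append(ip_digits[i])
--         elif nb == 0:
--             slots.append(None)
--     k = slots.count(None)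
--     # Enumerate the 2**k bit patterns; decode each counter MSB-first into the
--     # variable slots, which reproduces product's order (last position fastest).
--     result = []
--     for n in range(2 ** k):
--         combo = []
--         rem = n
--         r = k
--         for v in slots:
--             if v is None:
--                 r -= 1
--                 w = 2 ** r
--                 combo.append(rem // w)
--                 rem %= w
--             else:
--                 combo.append(v)
--         result.append(tuple(combo))
--     return result
-- ===== Notes on version B (the rewrite author's own statement) =====
-- stated objective: alternative
-- what changed: B drops A's index-keyed dict of per-position choice-lists and itertools.product: it builds a fixed/variable slot template, then enumerates the 2**k counters of range(2**k) and decodes each counter MSB-first into the variable slots.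
import Mathlib
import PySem

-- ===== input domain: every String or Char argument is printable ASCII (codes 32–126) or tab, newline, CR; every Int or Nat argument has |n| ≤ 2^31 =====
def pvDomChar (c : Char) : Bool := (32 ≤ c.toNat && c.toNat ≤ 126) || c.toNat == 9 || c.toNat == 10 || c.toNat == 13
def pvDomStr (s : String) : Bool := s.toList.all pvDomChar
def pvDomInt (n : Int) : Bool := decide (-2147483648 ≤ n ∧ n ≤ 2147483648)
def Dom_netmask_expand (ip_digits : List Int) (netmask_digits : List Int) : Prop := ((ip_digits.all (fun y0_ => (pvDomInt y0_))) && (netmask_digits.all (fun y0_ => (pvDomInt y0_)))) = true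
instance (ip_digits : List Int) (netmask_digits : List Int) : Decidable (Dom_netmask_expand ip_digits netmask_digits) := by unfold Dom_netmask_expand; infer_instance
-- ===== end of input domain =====

-- B replaces A's dict-of-choice-lists + itertools.product with counting: it builds a fixed/variable
-- slot template, then enumerates range(2**k) and decodes each counter MSB-first into the variable
-- slots (alternative algorithm, same cost).


-- ===== PORT A =====
-- itertools.product over a list of choice-lists, in product's lexicographic order (last varies fastest)
def pyProduct : List (List Int) → List (List Int)
  | [] => [[]]
  | l :: ls => l.flatMap (fun x => (pyProduct ls).map (fun t => x :: t))

-- ip_digits[index]: index is the nonnegative loop counter; pyGetD's default is unreachable on Pre_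
def netmask_expand (ip_digits : List Int) (netmask_digits : List Int) : List (List Int) :=
  pyProduct
    (netmask_digits.foldl
      (fun (p : PySem.Dict Int (List Int) × Int) nb =>
        if nb = 1 then (p.1.insert p.2 [PySem.List.pyGetD ip_digits p.2 0], p.2 + 1)
        else if nb = 0 then (p.1.insert p.2 [(0 : Int), 1], p.2 + 1)
        else (p.1, p.2 + 1))
      (PySem.Dict.empty, 0)).1.values

-- ===== PORT B =====
-- slots: fixed value per position (some v), none where the bit varies; then decode each
-- counter n ∈ range(2**k) MSB-first into the variable slots (state = (combo, rem, r))
def netmask_expand_alt (ip_digits : List Int) (netmask_digits : List Int) : List (List Int) :=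
  let slots : List (Option Int) :=
    (PySem.List.enumerate netmask_digits 0).foldl
      (fun acc p =>
        if p.2 = 1 then acc ++ [some (PySem.List.pyGetD ip_digits p.1 0)]
        else if p.2 = 0 then acc ++ [none] else acc) []
  let k : Nat := slots.count none
  (PySem.List.pyRange 0 ((2 : Int) ^ k) 1).foldl
    (fun res n =>
      res ++ [(slots.foldl
        (fun (st : List Int × Int × Nat) v =>
          match v with
          | none =>
            let r := st.2.2 - 1
            let w := (2 : Int) ^ r
            (st.1 ++ [PySem.Int.floordiv st.2.1 w], PySem.Int.mod st.2.1 w, r)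
          | some x => (st.1 ++ [x], st.2.1, st.2.2))
        ([], n, k)).1]) []

-- ===== PRECONDITION & SPEC =====
-- Pre_ excludes exactly the inputs where Python A raises IndexError: a netmask bit equal to 1
-- at a position not smaller than len(ip_digits). (Python B raises there too.)
def Pre_netmask_expand (ip_digits : List Int) (netmask_digits : List Int) : Prop :=
  ∀ i < netmask_digits.length, netmask_digits.getD i 0 = 1 → i < ip_digits.length
instance (ip_digits : List Int) (netmask_digits : List Int) : Decidable (Pre_netmask_expand ip_digits netmask_digits) := by unfold Pre_netmask_expand; infer_instance
def pvWitness_netmask_expand : List Int × List Int := ([0, 1, 0], [1, 1, 0])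

def Spec_netmask_expand (ip_digits : List Int) (netmask_digits : List Int) (out : List (List Int)) : Prop := out = netmask_expand_alt ip_digits netmask_digits
instance (ip_digits : List Int) (netmask_digits : List Int) (out : List (List Int)) : Decidable (Spec_netmask_expand ip_digits netmask_digits out) := by unfold Spec_netmask_expand; infer_instance

-- ===== CLAIM (what is proved, stated in full; the proofs are below) =====
def Claim_equal_netmask_expand : Prop := ∀ (ip_digits : List Int) (netmask_digits : List Int), Dom_netmask_expand ip_digits netmask_digits → Pre_netmask_expand ip_digits netmask_digits → Spec_netmask_expand ip_digits netmask_digits (netmask_expand ip_digits netmask_digits)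

-- ===== LEMMAS AND PROOFS =====

-- the slot template both programs are implicitly about: some v at fixed positions, none at variable ones
def pvSlots (ip : List Int) : Int → List Int → List (Option Int)
  | _, [] => []
  | i, nb :: rest =>
    (if nb = 1 then [some (PySem.List.pyGetD ip i 0)]
     else if nb = 0 then [(none : Option Int)] else []) ++ pvSlots ip (i + 1) rest

-- the choice-list a slot stands for (A's dict value at that position)
def pvChoicesOf : List (Option Int) → List (List Int)
  | [] => []
  | some v :: rest => [v] :: pvChoicesOf rest
  | none :: rest => [(0 : Int), 1] :: pvChoicesOf rest

-- A's loop fills the dict with exactly the choice-lists of the slot template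
lemma pvLoopA (ip : List Int) (ds : List Int) :
    ∀ (d : PySem.Dict Int (List Int)) (i : Int), (∀ k ∈ d.keys, k < i) →
    (ds.foldl
      (fun (p : PySem.Dict Int (List Int) × Int) nb =>
        if nb = 1 then (p.1.insert p.2 [PySem.List.pyGetD ip p.2 0], p.2 + 1)
        else if nb = 0 then (p.1.insert p.2 [(0 : Int), 1], p.2 + 1)
        else (p.1, p.2 + 1)) (d, i)).1.values
      = d.values ++ pvChoicesOf (pvSlots ip i ds) := by
  induction ds with
  | nil => intro d i _; simp [pvSlots, pvChoicesOf]
  | cons nb rest ih =>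
    intro d i hk
    have hfresh : d.contains i = false := by
      rw [PySem.Dict.contains_eq_decide_mem_keys]
      simp only [decide_eq_false_iff_not]
      intro hmem; exact absurd (hk i hmem) (lt_irrefl i)
    have hkeys : ∀ (v : List Int) (k : Int), k ∈ (d.insert i v).keys → k < i + 1 := by
      intro v k hmem
      rcases (PySem.Dict.mem_keys_insert d i k v).mp hmem with h | h
      · omega
      · exact lt_trans (hk k h) (by omega)
    have hvals : ∀ v : List Int, (d.insert i v).values = d.values ++ [v] := by
      intro v
      simp [PySem.Dict.values, PySem.Dict.items_insert, hfresh]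
    rw [List.foldl_cons]
    rcases eq_or_ne nb 1 with h1 | h1
    · subst h1
      simp only [pvSlots]
      norm_num
      rw [ih _ _ (hkeys _), hvals, List.append_assoc]
      rfl
    · rcases eq_or_ne nb 0 with h0 | h0
      · subst h0
        simp only [pvSlots]
        norm_num
        rw [ih _ _ (hkeys _), hvals, List.append_assoc]
        rfl
      · simp only [pvSlots, if_neg h1, if_neg h0]
        rw [ih _ _ (fun k hm => lt_trans (hk k hm) (by omega))]
        simp

lemma pvA_eq (ip ds : List Int) :
    netmask_expand ip ds = pyProduct (pvChoicesOf (pvSlots ip 0 ds)) := by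
  unfold netmask_expand
  rw [pvLoopA ip ds PySem.Dict.empty 0 (by simp [pysem])]
  rfl

-- B's template loop builds exactly pvSlots
lemma pvLoopSlots (ip : List Int) (ds : List Int) :
    ∀ (i : Int) (acc : List (Option Int)),
    (PySem.List.enumerate ds i).foldl
      (fun acc p =>
        if p.2 = 1 then acc ++ [some (PySem.List.pyGetD ip p.1 0)]
        else if p.2 = 0 then acc ++ [(none : Option Int)] else acc) acc
      = acc ++ pvSlots ip i ds := by
  induction ds with
  | nil => intro i acc; simp [PySem.List.enumerate_nil, pvSlots]
  | cons nb rest ih =>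
    intro i acc
    rw [PySem.List.enumerate_cons, List.foldl_cons]
    simp only
    split_ifs with h1 h0 <;>
      simp [pvSlots, *, List.append_assoc]

-- decoder: what B's inner loop computes from a counter value, defined structurally on the slots
def pvDec : List (Option Int) → Int → List Int
  | [], _ => []
  | some v :: rest, n => v :: pvDec rest n
  | none :: rest, n =>
      PySem.Int.floordiv n ((2 : Int) ^ rest.count none)
        :: pvDec rest (PySem.Int.mod n ((2 : Int) ^ rest.count none))

-- B's inner fold, started with r = count of variable slots, is the decoder
lemma pvLoopDec (S : List (Option Int)) :
    ∀ (n : Int) (acc : List Int),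
    (S.foldl
      (fun (st : List Int × Int × Nat) v =>
        match v with
        | none =>
          let r := st.2.2 - 1
          let w := (2 : Int) ^ r
          (st.1 ++ [PySem.Int.floordiv st.2.1 w], PySem.Int.mod st.2.1 w, r)
        | some x => (st.1 ++ [x], st.2.1, st.2.2))
      (acc, n, S.count none)).1 = acc ++ pvDec S n := by
  induction S with
  | nil => intro n acc; simp [pvDec]
  | cons v rest ih =>
    intro n acc
    cases v with
    | some x =>
      rw [List.foldl_cons]
      have hc : (some x :: rest).count (none : Option Int) = rest.count none := by
        simp
      rw [hc]
      simpa [pvDec, List.append_assoc] using ih n (acc ++ [x])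
    | none =>
      rw [List.foldl_cons]
      have hc : ((none : Option Int) :: rest).count none = rest.count none + 1 := by
        simp
      rw [hc]
      simpa [pvDec, List.append_assoc] using
        ih (PySem.Int.mod n ((2 : Int) ^ rest.count none))
          (acc ++ [PySem.Int.floordiv n ((2 : Int) ^ rest.count none)])

-- decoding all counters 0 .. 2^k - 1 yields the Cartesian product in product's order
lemma pvDecAll (S : List (Option Int)) :
    (List.range (2 ^ S.count (none : Option Int))).map (fun n : Nat => pvDec S (n : Int))
      = pyProduct (pvChoicesOf S) := by
  induction S with
  | nil => simp [pvDec, pvChoicesOf, pyProduct]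
  | cons v rest ih =>
    cases v with
    | some x =>
      have hc : (some x :: rest).count (none : Option Int) = rest.count none := by
        simp
      rw [hc]
      calc (List.range (2 ^ rest.count (none : Option Int))).map (fun n : Nat => pvDec (some x :: rest) (n : Int))
          = ((List.range (2 ^ rest.count (none : Option Int))).map (fun n : Nat => pvDec rest (n : Int))).map (fun t => x :: t) := by
            simp [pvDec, List.map_map, Function.comp_def]
        _ = pyProduct (pvChoicesOf (some x :: rest)) := by
            rw [ih]; simp [pvChoicesOf, pyProduct]
    | none =>
      have hc : ((none : Option Int) :: rest).count none = rest.count none + 1 := by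
        simp
      rw [hc]
      set c := rest.count (none : Option Int) with hcdef
      have hsplit : List.range (2 ^ (c + 1)) = List.range (2 ^ c) ++ (List.range (2 ^ c)).map (2 ^ c + ·) := by
        have h : 2 ^ (c + 1) = 2 ^ c + 2 ^ c := by ring
        rw [h, List.range_add]
      rw [hsplit, List.map_append, List.map_map]
      have hfst : (List.range (2 ^ c)).map (fun n : Nat => pvDec (none :: rest) (n : Int))
          = ((List.range (2 ^ c)).map (fun n : Nat => pvDec rest (n : Int))).map (fun t => (0 : Int) :: t) := by
        rw [List.map_map]
        refine List.map_congr_left ?_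
        intro j hj
        rw [List.mem_range] at hj
        have h2 : ((2 : Int) ^ c) = ((2 ^ c : Nat) : Int) := by push_cast; ring
        simp only [pvDec, Function.comp_def, ← hcdef, h2,
          PySem.Int.floordiv_natCast, PySem.Int.mod_natCast,
          Nat.div_eq_of_lt hj, Nat.mod_eq_of_lt hj, Nat.cast_zero]
      have hsnd : (List.range (2 ^ c)).map ((fun n : Nat => pvDec (none :: rest) (n : Int)) ∘ (2 ^ c + ·))
          = ((List.range (2 ^ c)).map (fun n : Nat => pvDec rest (n : Int))).map (fun t => (1 : Int) :: t) := by
        rw [List.map_map]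
        refine List.map_congr_left ?_
        intro j hj
        rw [List.mem_range] at hj
        have h2 : ((2 : Int) ^ c) = ((2 ^ c : Nat) : Int) := by push_cast; ring
        have hdiv : (2 ^ c + j) / 2 ^ c = 1 := by
          rw [Nat.add_comm, Nat.add_div_right _ (Nat.two_pow_pos c),
            Nat.div_eq_of_lt hj]
        have hmod : (2 ^ c + j) % 2 ^ c = j := by
          rw [Nat.add_comm, Nat.add_mod_right, Nat.mod_eq_of_lt hj]
        simp only [pvDec, Function.comp_def, ← hcdef, h2,
          PySem.Int.floordiv_natCast, PySem.Int.mod_natCast, hdiv, hmod, Nat.cast_one]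
      rw [hfst, hsnd, ih]
      simp [pvChoicesOf, pyProduct, List.flatMap_cons]

lemma pvB_eq (ip ds : List Int) :
    netmask_expand_alt ip ds = pyProduct (pvChoicesOf (pvSlots ip 0 ds)) := by
  unfold netmask_expand_alt
  simp only [pvLoopSlots ip ds 0 [], List.nil_append]
  set S := pvSlots ip 0 ds
  rw [PySem.List.foldl_append_singleton_eq_map, List.nil_append]
  have h2 : ((2 : Int) ^ S.count (none : Option Int)) = ((2 ^ S.count (none : Option Int) : Nat) : Int) := by
    push_cast; ring
  rw [h2, PySem.List.pyRange_zero_natCast, List.map_map]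
  rw [← pvDecAll S]
  refine List.map_congr_left ?_
  intro j _
  simpa using pvLoopDec S (j : Int) []

-- ===== VERDICT (by name: the statement is the Claim_ definition above) =====
theorem netmask_expand_spec : Claim_equal_netmask_expand := by
  intro ip ds _ _
  unfold Spec_netmask_expand
  rw [pvA_eq, pvB_eq]
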